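-- pv_equiv track=rewrite | github.com/truffleplanet/ps | 프로그래머스/2/42626. 더 맵게/더 맵게.py | solution
-- ===== SOURCE A (Python) =====
-- from heapq import heapify, heappop, heappush
--
-- def solution(scoville, K):
--     answer = 0
--     heapify(scoville)
--     while scoville[0] < K:
--         if len(scoville) < 2:
--             return -1
--         a = heappop(scoville)
--         b = heappop(scoville)
--         new = a + (2 * b)
--         heappush(scoville, new)
--         answer += 1
--
--     return answer
-- ===== SOURCE B (Python) =====
-- def solution(scoville, K):
--     # Sorted-list strategy instead of a binary heap: sort once (in place), then
--     # repeatedly combine the two front elements and re-insert the mix into the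
--     # sorted tail by a single linear merge scan.
--     scoville.sort()
--     answer = 0
--     while scoville[0] < K:
--         if len(scoville) < 2:
--             return -1
--         new = scoville[0] + 2 * scoville[1]
--         rest = scoville[2:]
--         merged = []
--         i = 0
--         while i < len(rest) and rest[i] <= new:
--             merged.append(rest[i])
--             i += 1
--         merged.append(new)
--         merged.extend(rest[i:])
--         scoville[:] = merged
--         answer += 1
--     return answer
-- ===== Notes on version B (the rewrite author's own statement) =====
-- stated objective: alternative
-- what changed: Replaces the binary heap with a list sorted once up front and maintained sorted by a linear merge re-insertion of each mixed value, reading the two minima directly at the front.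
import Mathlib
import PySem

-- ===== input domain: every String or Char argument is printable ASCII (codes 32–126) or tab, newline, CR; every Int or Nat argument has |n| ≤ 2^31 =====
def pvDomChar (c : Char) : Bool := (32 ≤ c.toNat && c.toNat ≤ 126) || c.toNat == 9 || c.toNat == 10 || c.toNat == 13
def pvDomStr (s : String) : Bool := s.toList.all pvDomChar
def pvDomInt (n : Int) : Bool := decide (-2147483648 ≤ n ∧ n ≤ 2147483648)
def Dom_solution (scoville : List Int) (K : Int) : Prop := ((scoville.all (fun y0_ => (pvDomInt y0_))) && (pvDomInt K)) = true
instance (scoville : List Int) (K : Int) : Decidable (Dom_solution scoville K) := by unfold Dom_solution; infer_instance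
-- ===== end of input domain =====

-- B changes the data structure (sorted list with linear merge re-insertion instead of a binary heap);
-- equivalence is about the RETURN value only: A heapifies its argument in place, B sorts it in place.

-- ===== PORT A =====
-- The heapq library is modelled by a mergeable min-heap (values-exact: heappop yields the
-- minimum, heappush inserts); A's own while loop is transliterated step for step below.
-- Recursions carry an explicit fuel that is always sufficient (proved below); fuel never changes
-- the computed value on the stated domain.
inductive PyHeap : Type
  | leaf : PyHeap
  | node : Int → PyHeap → PyHeap → PyHeap
deriving DecidableEq, Repr

def PyHeap.size : PyHeap → Nat
  | .leaf => 0
  | .node _ l r => 1 + l.size + r.size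

def PyHeap.mergeF : Nat → PyHeap → PyHeap → PyHeap
  | 0, _, h => h
  | _, .leaf, h => h
  | _, h, .leaf => h
  | n + 1, .node v l r, .node w l' r' =>
    if v ≤ w then .node v (PyHeap.mergeF n r (.node w l' r')) l
    else .node w (PyHeap.mergeF n r' (.node v l r)) l'

def PyHeap.merge (a b : PyHeap) : PyHeap := PyHeap.mergeF (a.size + b.size) a b

def PyHeap.push (h : PyHeap) (x : Int) : PyHeap := h.merge (.node x .leaf .leaf)

-- A's while loop: while scoville[0] < K: if len < 2: return -1; a = heappop; b = heappop;
-- heappush (a + 2*b); answer += 1.  (leaf on entry = IndexError, excluded by Pre_solution.)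
def solLoopA : Nat → PyHeap → Int → Int → Int
  | fuel, h, K, answer =>
    match h with
    | .leaf => answer
    | .node v l r =>
      if v < K then
        if (PyHeap.node v l r).size < 2 then -1
        else
          match fuel with
          | 0 => -1  -- fuel exhausted: unreachable when fuel + 1 ≥ heap size (proved below)
          | fuel + 1 =>
            match l.merge r with
            | .leaf => -1  -- unreachable: the heap remaining after the first pop is nonempty
            | .node b ml mr =>
              solLoopA fuel (PyHeap.push (ml.merge mr) (v + 2 * b)) K (answer + 1)
      else answer

def solution (scoville : List Int) (K : Int) : Int :=
  solLoopA scoville.length (scoville.foldl PyHeap.push PyHeap.leaf) K 0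

-- ===== PORT B =====
-- the inner merge scan of Source B: copy elements ≤ new, place new, append the remainder
def insSorted : List Int → Int → List Int
  | [], x => [x]
  | y :: ys, x => if y ≤ x then y :: insSorted ys x else x :: y :: ys

def solLoopB : Nat → List Int → Int → Int → Int
  | fuel, xs, K, answer =>
    match xs with
    | [] => answer
    | x :: rest =>
      if x < K then
        match rest with
        | [] => -1
        | y :: rest2 =>
          match fuel with
          | 0 => -1  -- fuel exhausted: unreachable when fuel + 1 ≥ list length (proved below)
          | fuel + 1 => solLoopB fuel (insSorted rest2 (x + 2 * y)) K (answer + 1)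
      else answer

def solution_alt (scoville : List Int) (K : Int) : Int :=
  solLoopB scoville.length (PySem.List.sorted scoville (fun x => x) false) K 0

-- ===== PRECONDITION & SPEC =====
-- Pre_ excludes only the empty list, on which A raises IndexError at scoville[0] (B raises too).
def Pre_solution (scoville : List Int) (K : Int) : Prop := scoville ≠ []
instance (scoville : List Int) (K : Int) : Decidable (Pre_solution scoville K) := by
  unfold Pre_solution; infer_instance
def pvWitness_solution : List Int × Int := ([1, 2, 3, 9, 10, 12], 7)
def Spec_solution (scoville : List Int) (K : Int) (out : Int) : Prop := out = solution_alt scoville K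
instance (scoville : List Int) (K : Int) (out : Int) : Decidable (Spec_solution scoville K out) := by
  unfold Spec_solution; infer_instance

-- ===== CLAIM (what is proved, stated in full; the proofs are below) =====
def Claim_equal_solution : Prop := ∀ (scoville : List Int) (K : Int), Dom_solution scoville K → Pre_solution scoville K → Spec_solution scoville K (solution scoville K)

-- ===== LEMMAS AND PROOFS =====

def PyHeap.toMS : PyHeap → Multiset Int
  | .leaf => 0
  | .node v l r => v ::ₘ (l.toMS + r.toMS)

def PyHeap.IsHeap : PyHeap → Prop
  | .leaf => True
  | .node v l r => (∀ x ∈ l.toMS, v ≤ x) ∧ (∀ x ∈ r.toMS, v ≤ x) ∧ l.IsHeap ∧ r.IsHeap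

theorem PyHeap.size_eq_zero {a : PyHeap} (h : a.size = 0) : a = .leaf := by
  cases a with
  | leaf => rfl
  | node v l r => simp [PyHeap.size] at h

theorem PyHeap.size_mergeF (n : Nat) : ∀ (a b : PyHeap), a.size + b.size ≤ n →
    (PyHeap.mergeF n a b).size = a.size + b.size := by
  induction n with
  | zero =>
      intro a b hle
      have ha : a.size = 0 := by omega
      rw [PyHeap.size_eq_zero ha]
      simp [PyHeap.mergeF, PyHeap.size]
  | succ n ih =>
      intro a b hle
      cases a with
      | leaf => simp [PyHeap.mergeF, PyHeap.size]
      | node v l r =>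
        cases b with
        | leaf => simp [PyHeap.mergeF, PyHeap.size]
        | node w l' r' =>
          simp only [PyHeap.mergeF]
          simp only [PyHeap.size] at hle
          split
          · have := ih r (.node w l' r') (by simp [PyHeap.size]; omega)
            simp [PyHeap.size, this]; omega
          · have := ih r' (.node v l r) (by simp [PyHeap.size]; omega)
            simp [PyHeap.size, this]; omega

theorem PyHeap.size_merge (a b : PyHeap) : (a.merge b).size = a.size + b.size :=
  PyHeap.size_mergeF _ a b (le_refl _)

theorem PyHeap.size_push (h : PyHeap) (x : Int) : (h.push x).size = h.size + 1 := by
  simp [PyHeap.push, PyHeap.size_merge, PyHeap.size]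

theorem PyHeap.toMS_mergeF (n : Nat) : ∀ (a b : PyHeap), a.size + b.size ≤ n →
    (PyHeap.mergeF n a b).toMS = a.toMS + b.toMS := by
  induction n with
  | zero =>
      intro a b hle
      have ha : a.size = 0 := by omega
      rw [PyHeap.size_eq_zero ha]
      simp [PyHeap.mergeF, PyHeap.toMS]
  | succ n ih =>
      intro a b hle
      cases a with
      | leaf => simp [PyHeap.mergeF, PyHeap.toMS]
      | node v l r =>
        cases b with
        | leaf => simp [PyHeap.mergeF, PyHeap.toMS]
        | node w l' r' =>
          simp only [PyHeap.mergeF]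
          simp only [PyHeap.size] at hle
          split
          · rw [PyHeap.toMS, ih r (.node w l' r') (by simp [PyHeap.size]; omega)]
            simp only [PyHeap.toMS, ← Multiset.singleton_add]
            abel
          · rw [PyHeap.toMS, ih r' (.node v l r) (by simp [PyHeap.size]; omega)]
            simp only [PyHeap.toMS, ← Multiset.singleton_add]
            abel

theorem PyHeap.toMS_merge (a b : PyHeap) : (a.merge b).toMS = a.toMS + b.toMS :=
  PyHeap.toMS_mergeF _ a b (le_refl _)

theorem PyHeap.root_le {v : Int} {l r : PyHeap} (h : (PyHeap.node v l r).IsHeap) :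
    ∀ x ∈ (PyHeap.node v l r).toMS, v ≤ x := by
  intro x hx
  simp [PyHeap.toMS] at hx
  rcases hx with rfl | hx | hx
  · exact le_refl x
  · exact h.1 x hx
  · exact h.2.1 x hx

theorem PyHeap.mergeF_isHeap (n : Nat) : ∀ {a b : PyHeap}, a.size + b.size ≤ n →
    a.IsHeap → b.IsHeap → (PyHeap.mergeF n a b).IsHeap := by
  induction n with
  | zero =>
      intro a b hle ha hb
      have h0 : a.size = 0 := by omega
      rw [PyHeap.size_eq_zero h0]
      simpa [PyHeap.mergeF]
  | succ n ih =>
      intro a b hle ha hb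
      cases a with
      | leaf => simpa [PyHeap.mergeF]
      | node v l r =>
        cases b with
        | leaf => simpa [PyHeap.mergeF]
        | node w l' r' =>
          simp only [PyHeap.mergeF]
          simp only [PyHeap.size] at hle
          split
          · rename_i hvw
            refine ⟨?_, fun x hx => ha.1 x hx,
              ih (by simp [PyHeap.size]; omega) ha.2.2.2 hb, ha.2.2.1⟩
            intro x hx
            rw [PyHeap.toMS_mergeF n r (.node w l' r') (by simp [PyHeap.size]; omega)] at hx
            rcases Multiset.mem_add.mp hx with hx | hx
            · exact ha.2.1 x hx
            · exact le_trans hvw (PyHeap.root_le hb x hx)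
          · rename_i hvw
            have hwv : w ≤ v := le_of_lt (lt_of_not_ge hvw)
            refine ⟨?_, fun x hx => hb.1 x hx,
              ih (by simp [PyHeap.size]; omega) hb.2.2.2 ha, hb.2.2.1⟩
            intro x hx
            rw [PyHeap.toMS_mergeF n r' (.node v l r) (by simp [PyHeap.size]; omega)] at hx
            rcases Multiset.mem_add.mp hx with hx | hx
            · exact hb.2.1 x hx
            · exact le_trans hwv (PyHeap.root_le ha x hx)

theorem PyHeap.merge_isHeap {a b : PyHeap} (ha : a.IsHeap) (hb : b.IsHeap) :
    (a.merge b).IsHeap :=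
  PyHeap.mergeF_isHeap _ (le_refl _) ha hb

theorem PyHeap.push_isHeap {a : PyHeap} (ha : a.IsHeap) (x : Int) : (a.push x).IsHeap :=
  PyHeap.merge_isHeap ha (by simp [PyHeap.IsHeap, PyHeap.toMS])

theorem PyHeap.toMS_push (a : PyHeap) (x : Int) : (a.push x).toMS = x ::ₘ a.toMS := by
  simp [PyHeap.push, PyHeap.toMS_merge, PyHeap.toMS]
  rw [← Multiset.singleton_add, add_comm, Multiset.singleton_add]

theorem heapify_isHeap (xs : List Int) (acc : PyHeap) (hacc : acc.IsHeap) :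
    (xs.foldl PyHeap.push acc).IsHeap := by
  induction xs generalizing acc with
  | nil => simpa
  | cons x xs ih => exact ih _ (PyHeap.push_isHeap hacc x)

theorem heapify_toMS (xs : List Int) (acc : PyHeap) :
    (xs.foldl PyHeap.push acc).toMS = acc.toMS + (xs : Multiset Int) := by
  induction xs generalizing acc with
  | nil => simp
  | cons x xs ih =>
      simp only [List.foldl_cons, ih, PyHeap.toMS_push]
      rw [← Multiset.cons_coe, ← Multiset.singleton_add, ← Multiset.singleton_add]
      abel

theorem PyHeap.card_toMS (h : PyHeap) : h.toMS.card = h.size := by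
  induction h with
  | leaf => simp [PyHeap.toMS, PyHeap.size]
  | node v l r ihl ihr => simp [PyHeap.toMS, PyHeap.size, ihl, ihr]; omega

theorem insSorted_coe (ys : List Int) (x : Int) :
    ((insSorted ys x : List Int) : Multiset Int) = x ::ₘ (ys : Multiset Int) := by
  induction ys with
  | nil => simp [insSorted]
  | cons y ys ih =>
      simp only [insSorted]
      split
      · rw [← Multiset.cons_coe, ← Multiset.cons_coe, ih, Multiset.cons_swap]
      · simp

theorem insSorted_pairwise {ys : List Int} (hs : ys.Pairwise (· ≤ ·)) (x : Int) :
    (insSorted ys x).Pairwise (· ≤ ·) := by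
  induction ys with
  | nil => simp [insSorted]
  | cons y ys ih =>
      simp only [insSorted]
      rcases List.pairwise_cons.mp hs with ⟨hy, hys⟩
      split
      · refine List.pairwise_cons.mpr ⟨?_, ih hys⟩
        intro z hz
        have : z = x ∨ z ∈ ys := by
          have := insSorted_coe ys x
          have hz' : z ∈ ((insSorted ys x : List Int) : Multiset Int) := by simpa using hz
          rw [this] at hz'
          simpa using hz'
        rcases this with rfl | hz'
        · assumption
        · exact hy z hz'
      · rename_i hyx
        have hxy : x ≤ y := le_of_lt (lt_of_not_ge hyx)
        refine List.pairwise_cons.mpr ⟨?_, hs⟩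
        intro z hz
        rcases List.mem_cons.mp hz with rfl | hz
        · exact hxy
        · exact le_trans hxy (hy z hz)

theorem head_sorted_le {x : Int} {rest : List Int} (hs : (x :: rest).Pairwise (· ≤ ·)) :
    ∀ z ∈ ((x :: rest : List Int) : Multiset Int), x ≤ z := by
  intro z hz
  rcases List.mem_cons.mp (by simpa using hz) with rfl | hz
  · exact le_refl z
  · exact (List.pairwise_cons.mp hs).1 z hz

theorem min_unique {M : Multiset Int} {v x : Int} (hv : v ∈ M) (hx : x ∈ M)
    (hvle : ∀ z ∈ M, v ≤ z) (hxle : ∀ z ∈ M, x ≤ z) : v = x :=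
  le_antisymm (hvle x hx) (hxle v hv)

-- the loop invariant: same multiset of spiciness values (heap-ordered on one side, sorted on
-- the other) and a shared fuel that bounds the heap size / list length
theorem loop_eq (fuel : Nat) : ∀ (h : PyHeap) (l : List Int) (K ans : Int),
    h.size ≤ fuel + 1 → h.IsHeap → l.Pairwise (· ≤ ·) → h.toMS = (l : Multiset Int) →
    solLoopA fuel h K ans = solLoopB fuel l K ans := by
  induction fuel with
  | zero =>
      intro h l K ans hsz hheap hsort hms
      cases h with
      | leaf =>
          have hl : l = [] := by
            have : (l : Multiset Int) = 0 := by rw [← hms]; rfl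
            simpa using this
          subst hl; simp [solLoopA, solLoopB]
      | node v hl hr =>
          cases l with
          | nil =>
              exfalso
              have : (PyHeap.node v hl hr).toMS = 0 := by simpa using hms
              simp [PyHeap.toMS] at this
          | cons x rest =>
              have hvx : v = x := by
                refine min_unique (M := (PyHeap.node v hl hr).toMS) ?_ ?_
                    (PyHeap.root_le hheap) ?_
                · simp [PyHeap.toMS]
                · rw [hms]; simp
                · intro z hz; rw [hms] at hz; exact head_sorted_le hsort z hz
              subst hvx
              -- size ≤ 1 forces a singleton on both sides
              have hcard : hl.size + hr.size = rest.length := by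
                have := congrArg Multiset.card hms
                simpa [PyHeap.card_toMS, PyHeap.toMS, PyHeap.size] using this
              have hrest : rest = [] := by
                simp [PyHeap.size] at hsz
                cases rest with
                | nil => rfl
                | cons y t => simp at hcard; omega
              subst hrest
              have hsz1 : (PyHeap.node v hl hr).size < 2 := by
                have hc : hl.size + hr.size = 0 := by simpa using hcard
                simp [PyHeap.size]; omega
              rw [solLoopA, solLoopB]
              simp [hsz1]
  | succ fuel ih =>
      intro h l K ans hsz hheap hsort hms
      cases h with
      | leaf =>
          have hl : l = [] := by
            have : (l : Multiset Int) = 0 := by rw [← hms]; rfl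
            simpa using this
          subst hl; simp [solLoopA, solLoopB]
      | node v hl hr =>
          cases l with
          | nil =>
              exfalso
              have : (PyHeap.node v hl hr).toMS = 0 := by simpa using hms
              simp [PyHeap.toMS] at this
          | cons x rest =>
              have hvx : v = x := by
                refine min_unique (M := (PyHeap.node v hl hr).toMS) ?_ ?_
                    (PyHeap.root_le hheap) ?_
                · simp [PyHeap.toMS]
                · rw [hms]; simp
                · intro z hz; rw [hms] at hz; exact head_sorted_le hsort z hz
              subst hvx
              have hcard : hl.size + hr.size = rest.length := by
                have := congrArg Multiset.card hms
                simpa [PyHeap.card_toMS, PyHeap.toMS, PyHeap.size] using this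
              have hrestms : hl.toMS + hr.toMS = (rest : Multiset Int) := by
                have : v ::ₘ (hl.toMS + hr.toMS) = v ::ₘ (rest : Multiset Int) := by
                  have hms' := hms
                  simp only [PyHeap.toMS] at hms'
                  rw [hms']; simp
                simpa [← Multiset.cons_coe] using this
              cases rest with
              | nil =>
                  have hsz1 : (PyHeap.node v hl hr).size < 2 := by
                    have hc : hl.size + hr.size = 0 := by simpa using hcard
                    simp [PyHeap.size]; omega
                  rw [solLoopA, solLoopB]
                  simp [hsz1]
              | cons y rest2 =>
                  have hsz2 : ¬ (PyHeap.node v hl hr).size < 2 := by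
                    have hc : hl.size + hr.size = rest2.length + 1 := by simpa using hcard
                    simp [PyHeap.size]; omega
                  rw [solLoopA, solLoopB]
                  by_cases hK : v < K
                  · simp only [if_pos hK, if_neg hsz2]
                    have hmergems : (hl.merge hr).toMS = ((y :: rest2 : List Int) : Multiset Int) := by
                      rw [PyHeap.toMS_merge, hrestms]
                    split
                    · rename_i hmr
                      exfalso
                      rw [hmr] at hmergems
                      have : ((y :: rest2 : List Int) : Multiset Int) = 0 := by
                        rw [← hmergems]; rfl
                      simp at this
                    · rename_i b ml mr hmr
                      rw [hmr] at hmergems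
                      have hmheap : (PyHeap.node b ml mr).IsHeap := by
                        rw [← hmr]; exact PyHeap.merge_isHeap hheap.2.2.1 hheap.2.2.2
                      have hsort' : (y :: rest2).Pairwise (· ≤ ·) :=
                        (List.pairwise_cons.mp hsort).2
                      have hby : b = y := by
                        refine min_unique (M := (PyHeap.node b ml mr).toMS) ?_ ?_
                            (PyHeap.root_le hmheap) ?_
                        · simp [PyHeap.toMS]
                        · rw [hmergems]; simp
                        · intro z hz; rw [hmergems] at hz; exact head_sorted_le hsort' z hz
                      subst hby
                      have hrest2ms : ml.toMS + mr.toMS = (rest2 : Multiset Int) := by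
                        have : b ::ₘ (ml.toMS + mr.toMS) = b ::ₘ (rest2 : Multiset Int) := by
                          have h1 : (PyHeap.node b ml mr).toMS = b ::ₘ (ml.toMS + mr.toMS) := rfl
                          rw [← h1, hmergems]; simp
                        simpa [← Multiset.cons_coe] using this
                      refine ih _ _ _ _ ?_ ?_ ?_ ?_
                      · have h2 : (hl.merge hr).size = hl.size + hr.size :=
                          PyHeap.size_merge hl hr
                        rw [hmr] at h2
                        simp [PyHeap.size_push, PyHeap.size_merge, PyHeap.size] at h2 hsz ⊢
                        omega
                      · exact PyHeap.push_isHeap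
                          (PyHeap.merge_isHeap hmheap.2.2.1 hmheap.2.2.2) _
                      · exact insSorted_pairwise (List.pairwise_cons.mp hsort').2 _
                      · rw [PyHeap.toMS_push, PyHeap.toMS_merge, hrest2ms, insSorted_coe]
                  · simp [if_neg hK]

-- ===== VERDICT (by name: the statement is the Claim_ definition above) =====
theorem solution_spec : Claim_equal_solution := by
  intro scoville K _ _
  unfold Spec_solution solution solution_alt
  refine loop_eq _ _ _ _ _ ?_ ?_ ?_ ?_
  · have : (scoville.foldl PyHeap.push PyHeap.leaf).toMS = (scoville : Multiset Int) := by
      rw [heapify_toMS]; simp [PyHeap.toMS]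
    have := congrArg Multiset.card this
    simp [PyHeap.card_toMS] at this
    omega
  · exact heapify_isHeap scoville PyHeap.leaf trivial
  · have := PySem.List.sorted_pairwise (xs := scoville) (key := fun x : Int => x)
    simpa using this
  · rw [heapify_toMS]
    have hperm : (PySem.List.sorted scoville (fun x => x) false).Perm scoville :=
      PySem.List.sorted_perm ..
    have := Multiset.coe_eq_coe.mpr hperm
    simp [PyHeap.toMS, this]
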